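-- pv_equiv track=rewrite | github.com/gavinblanusa/finance_terminal | app/openbb_adapter.py | _pick_income_revenue_column
-- ===== SOURCE A (Python) =====
-- from typing import Any, Dict, List, Optional
--
-- def _normalize_income_column_name(name: Any) -> str:
--     return str(name).strip().lower().replace(" ", "_").replace("-", "_")
--
-- _INCOME_REVENUE_COLUMN_ORDER: tuple[str, ...] = (
--     "total_revenue",
--     "totalrevenue",
--     "total_revenues",
--     "operating_revenue",
--     "operatingrevenue",
--     "operating_revenues",
--     "revenue",
--     "revenues",
--     "net_sales",
--     "netsales",
--     "sales",
-- )
--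
-- def _is_bad_income_revenue_column(norm: str) -> bool:
--     """Columns whose name contains 'revenue' but are not quarterly total sales (e.g. COGS)."""
--     bad = (
--         "cost_of",
--         "costof",
--         "growth",
--         "per_share",
--         "pershare",
--         "estimate",
--         "margin",
--         "deferred",
--         "unearned",
--         "yield",
--         "cagr",
--         "ratio",
--     )
--     return any(b in norm for b in bad)
--
-- def _pick_income_revenue_column(columns: Any) -> Optional[str]:
--     """Choose the income-statement column to sum for trailing-four-quarter revenue."""
--     col_list = [str(c) for c in columns]
--     norms = {c: _normalize_income_column_name(c) for c in col_list}
--     for target in _INCOME_REVENUE_COLUMN_ORDER: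
--         for orig, norm in norms.items():
--             if norm != target or _is_bad_income_revenue_column(norm):
--                 continue
--             return orig
--     for orig, norm in norms.items():
--         if "revenue" not in norm or _is_bad_income_revenue_column(norm):
--             continue
--         return orig
--     return None
-- ===== SOURCE B (Python) =====
-- from typing import Any, Optional
--
-- def _normalize_income_column_name(name: Any) -> str:
--     return str(name).strip().lower().replace(" ", "_").replace("-", "_")
--
-- _INCOME_REVENUE_COLUMN_ORDER: tuple[str, ...] = (
--     "total_revenue",
--     "totalrevenue",
--     "total_revenues",
--     "operating_revenue",
--     "operatingrevenue",
--     "operating_revenues",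
--     "revenue",
--     "revenues",
--     "net_sales",
--     "netsales",
--     "sales",
-- )
--
-- def _is_bad_income_revenue_column(norm: str) -> bool:
--     bad = (
--         "cost_of",
--         "costof",
--         "growth",
--         "per_share",
--         "pershare",
--         "estimate",
--         "margin",
--         "deferred",
--         "unearned",
--         "yield",
--         "cagr",
--         "ratio",
--     )
--     return any(b in norm for b in bad)
--
-- def _pick_income_revenue_column(columns: Any) -> Optional[str]:
--     """Index columns by normalized name once, then look targets up directly."""
--     col_list = [str(c) for c in columns]
--     index = {}
--     for c in col_list:
--         n = _normalize_income_column_name(c)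
--         if n not in index:
--             index[n] = c
--     for target in _INCOME_REVENUE_COLUMN_ORDER:
--         if target in index:
--             return index[target]
--     for c in col_list:
--         n = _normalize_income_column_name(c)
--         if "revenue" in n and not _is_bad_income_revenue_column(n):
--             return c
--     return None
-- ===== Notes on version B (the rewrite author's own statement) =====
-- stated objective: alternative
-- what changed: Replaces A's nested scan (for each of the 11 priority targets, rescan the whole normalized-columns dict) by a single pass building a norm->first-original-column index followed by 11 direct dict lookups; the fallback substring scan runs once over the original columns in order.
import Mathlib
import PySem

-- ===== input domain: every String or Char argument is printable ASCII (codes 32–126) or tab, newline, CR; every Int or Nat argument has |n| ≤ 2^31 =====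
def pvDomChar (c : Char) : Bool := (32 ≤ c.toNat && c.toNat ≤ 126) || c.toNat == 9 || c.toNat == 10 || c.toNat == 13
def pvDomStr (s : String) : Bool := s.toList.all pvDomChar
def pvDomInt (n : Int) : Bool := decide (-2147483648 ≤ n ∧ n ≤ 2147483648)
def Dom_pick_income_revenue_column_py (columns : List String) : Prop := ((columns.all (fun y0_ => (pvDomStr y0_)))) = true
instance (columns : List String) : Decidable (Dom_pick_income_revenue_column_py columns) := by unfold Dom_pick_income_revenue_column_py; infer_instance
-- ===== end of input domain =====

-- B replaces A's rescan of the normalized-columns dict for each of the 11 priority targets by one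
-- norm→first-column index built in a single pass, followed by direct lookups (objective: alternative).

-- shared module helpers (_normalize_income_column_name, _INCOME_REVENUE_COLUMN_ORDER, _is_bad_income_revenue_column)
def normCol (s : String) : String :=
  PySem.Str.replace (PySem.Str.replace (PySem.Str.lower (PySem.Str.strip s)) " " "_") "-" "_"

def incomeRevenueOrder : List String :=
  ["total_revenue", "totalrevenue", "total_revenues", "operating_revenue", "operatingrevenue",
   "operating_revenues", "revenue", "revenues", "net_sales", "netsales", "sales"]

def isBadCol (norm : String) : Bool :=
  ["cost_of", "costof", "growth", "per_share", "pershare", "estimate", "margin", "deferred",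
   "unearned", "yield", "cagr", "ratio"].any (fun b => PySem.Str.isIn b norm)

-- ===== PORT A =====
-- inner loop 'for orig, norm in norms.items(): if norm != target or bad(norm): continue; return orig'
def pickInnerA (target : String) : List (String × String) → Option String
  | [] => none
  | (orig, norm) :: rest =>
    if norm != target || isBadCol norm then pickInnerA target rest else some orig

-- outer loop 'for target in _INCOME_REVENUE_COLUMN_ORDER: …'
def pickTargetsA (items : List (String × String)) : List String → Option String
  | [] => none
  | t :: ts =>
    match pickInnerA t items with
    | some o => some o
    | none => pickTargetsA items ts

-- fallback loop 'for orig, norm in norms.items(): if "revenue" not in norm or bad(norm): continue; return orig'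
def pickFallbackA : List (String × String) → Option String
  | [] => none
  | (orig, norm) :: rest =>
    if !PySem.Str.isIn "revenue" norm || isBadCol norm then pickFallbackA rest else some orig

def pick_income_revenue_column_py (columns : List String) : Option String :=
  let col_list := columns.map (fun c => c)   -- [str(c) for c in columns]
  let norms : PySem.Dict String String :=
    col_list.foldl (fun d c => d.insert c (normCol c)) PySem.Dict.empty
  match pickTargetsA norms.items incomeRevenueOrder with
  | some o => some o
  | none => pickFallbackA norms.items

-- ===== PORT B =====
-- 'for target in order: if target in index: return index[target]'
def pickTargetsB (index : PySem.Dict String String) : List String → Option String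
  | [] => none
  | t :: ts =>
    match index.get? t with
    | some o => some o
    | none => pickTargetsB index ts

def pick_income_revenue_column_py_alt (columns : List String) : Option String :=
  let col_list := columns.map (fun c => c)   -- [str(c) for c in columns]
  let index : PySem.Dict String String :=
    col_list.foldl (fun d c => if d.contains (normCol c) then d else d.insert (normCol c) c)
      PySem.Dict.empty
  match pickTargetsB index incomeRevenueOrder with
  | some o => some o
  | none => col_list.find? (fun c => PySem.Str.isIn "revenue" (normCol c) && !isBadCol (normCol c))

-- ===== PRECONDITION & SPEC =====
def Spec_pick_income_revenue_column_py (columns : List String) (out : Option String) : Prop := out = pick_income_revenue_column_py_alt columns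
instance (columns : List String) (out : Option String) : Decidable (Spec_pick_income_revenue_column_py columns out) := by unfold Spec_pick_income_revenue_column_py; infer_instance

-- ===== CLAIM (what is proved, stated in full; the proofs are below) =====
def Claim_equal_pick_income_revenue_column_py : Prop := ∀ (columns : List String), Dom_pick_income_revenue_column_py columns → Spec_pick_income_revenue_column_py columns (pick_income_revenue_column_py columns)

-- ===== LEMMAS AND PROOFS =====

-- A's norms dict pairs each distinct column (first occurrences, in order) with its normalization.
theorem normsDict_items (cols : List String) (d : PySem.Dict String String) (s : List String)
    (hit : d.items = s.map (fun c => (c, normCol c))) (hk : d.keys = s) (hs : s.Nodup) :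
    (cols.foldl (fun d c => d.insert c (normCol c)) d).items
      = (PySem.Set.update s cols).map (fun c => (c, normCol c)) := by
  induction cols generalizing d s with
  | nil => simpa [PySem.Set.update_nil] using hit
  | cons c cs ih =>
    by_cases hc : c ∈ s
    · have hcont : d.contains c = true := by
        rw [PySem.Dict.contains_iff_mem_keys, hk]; exact hc
      have hit' : (d.insert c (normCol c)).items = s.map (fun c => (c, normCol c)) := by
        rw [PySem.Dict.items_insert_of_contains d (normCol c) hcont, hit, List.map_map]
        refine List.map_congr_left (fun k _ => ?_)
        by_cases hkc : k = c <;> simp [hkc]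
      have hk' : (d.insert c (normCol c)).keys = s := by
        rw [PySem.Dict.keys_insert_of_contains d (normCol c) hcont, hk]
      simpa [PySem.Set.update_cons, PySem.Set.add_of_mem hc] using ih _ _ hit' hk' hs
    · have hcont : d.contains c = false := by
        rw [Bool.eq_false_iff, Ne, PySem.Dict.contains_iff_mem_keys, hk]; exact hc
      have hit' : (d.insert c (normCol c)).items = (s ++ [c]).map (fun c => (c, normCol c)) := by
        rw [PySem.Dict.items_insert_of_not_contains d (normCol c) hcont, hit]; simp
      have hk' : (d.insert c (normCol c)).keys = s ++ [c] := by
        rw [PySem.Dict.keys_insert_of_not_contains d (normCol c) hcont, hk]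
      have hs' : (s ++ [c]).Nodup := by
        simp [List.nodup_append, hs]
        exact fun a ha h => hc (h ▸ ha)
      simpa [PySem.Set.update_cons, PySem.Set.add_of_not_mem hc] using ih _ _ hit' hk' hs'

-- A's inner scan over the (column, norm) pairs is a find? over the columns (none if the target is bad).
theorem pickInnerA_map (t : String) (K : List String) :
    pickInnerA t (K.map (fun c => (c, normCol c)))
      = if isBadCol t then none else K.find? (fun c => normCol c == t) := by
  induction K with
  | nil => cases isBadCol t <;> simp [pickInnerA]
  | cons c K ih =>
    simp only [List.map_cons, pickInnerA]
    by_cases h : normCol c = t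
    · cases hb : isBadCol t with
      | true =>
        have hcond : (normCol c != t || isBadCol (normCol c)) = true := by rw [h, hb]; simp
        rw [hcond, if_pos rfl, ih]
        simp [hb]
      | false =>
        have hcond : (normCol c != t || isBadCol (normCol c)) = false := by rw [h, hb]; simp
        rw [hcond, if_neg (by simp), if_neg (by simp),
          List.find?_cons_of_pos (by simp [h])]
    · have hcond : (normCol c != t || isBadCol (normCol c)) = true := by simp [h]
      rw [hcond, if_pos rfl, ih, List.find?_cons_of_neg (by simp [h])]

-- A's fallback scan is a find? over the columns.
theorem pickFallbackA_map (K : List String) :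
    pickFallbackA (K.map (fun c => (c, normCol c)))
      = K.find? (fun c => PySem.Str.isIn "revenue" (normCol c) && !isBadCol (normCol c)) := by
  induction K with
  | nil => rfl
  | cons c K ih =>
    simp only [List.map_cons, pickFallbackA]
    cases h1 : PySem.Str.isIn "revenue" (normCol c) with
    | false =>
      have h1' : PySem.Chars.isIn ['r', 'e', 'v', 'e', 'n', 'u', 'e'] (normCol c).toList = false := by
        simpa using h1
      rw [if_pos (by simp), ih, List.find?_cons_of_neg (by simp [h1'])]
    | true =>
      have h1' : PySem.Chars.isIn ['r', 'e', 'v', 'e', 'n', 'u', 'e'] (normCol c).toList = true := by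
        simpa using h1
      cases h2 : isBadCol (normCol c) with
      | true =>
        rw [if_pos (by simp), ih, List.find?_cons_of_neg (by simp [h2])]
      | false =>
        rw [if_neg (by simp), List.find?_cons_of_pos (by simp [h1', h2])]

-- removing an element that fails p does not change the first match
theorem find?_discard (p : String → Bool) (s : List String) (x : String)
    (hx : p x = false) : (PySem.Set.discard s x).find? p = s.find? p := by
  induction s with
  | nil => rfl
  | cons a s ih =>
    have ih' : (List.filter (fun y => !(y == x)) s).find? p = s.find? p := ih
    show (List.filter (fun y => !(y == x)) (a :: s)).find? p = _
    rw [List.filter_cons]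
    by_cases hax : a = x
    · subst hax
      rw [if_neg (by simp), ih', List.find?_cons_of_neg (by simp [hx])]
    · rw [if_pos (by simp [hax])]
      by_cases hp : p a = true
      · rw [List.find?_cons_of_pos hp, List.find?_cons_of_pos hp]
      · have hp' : p a = false := by simpa using hp
        rw [List.find?_cons_of_neg (by simp [hp']), List.find?_cons_of_neg (by simp [hp']), ih']

-- first-occurrence dedup preserves the first match
theorem find?_ofList (p : String → Bool) (xs : List String) :
    (PySem.Set.ofList xs).find? p = xs.find? p := by
  induction xs with
  | nil => rfl
  | cons x xs ih =>
    rw [PySem.Set.ofList_cons]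
    by_cases hp : p x = true
    · rw [List.find?_cons_of_pos hp, List.find?_cons_of_pos hp]
    · have hp' : p x = false := by simpa using hp
      rw [List.find?_cons_of_neg (by simp [hp']), List.find?_cons_of_neg (by simp [hp']),
        find?_discard p _ x hp', ih]

-- B's index lookup returns the first column whose normalization is t.
theorem indexB_get? (cols : List String) (d : PySem.Dict String String) (t : String) :
    ((cols.foldl (fun d c => if d.contains (normCol c) then d else d.insert (normCol c) c) d).get? t)
      = (d.get? t).or (cols.find? (fun c => normCol c == t)) := by
  induction cols generalizing d with
  | nil => simp
  | cons c cs ih =>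
    rw [List.foldl_cons, ih]
    by_cases hc : d.contains (normCol c) = true
    · rw [if_pos hc]
      by_cases ht : normCol c = t
      · have hsome : (d.get? t).isSome := by
          rw [← PySem.Dict.contains_eq_isSome_get?]; rwa [ht] at hc
        cases hv : d.get? t with
        | none => simp [hv] at hsome
        | some v => simp
      · rw [List.find?_cons_of_neg (by simp [ht])]
    · rw [if_neg hc]
      have hnone : d.get? (normCol c) = none := by
        rw [PySem.Dict.get?_eq_none_iff_contains]; simpa using hc
      by_cases ht : t = normCol c
      · subst ht
        rw [PySem.Dict.get?_insert_self, hnone,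
          List.find?_cons_of_pos (by simp)]
        simp
      · rw [PySem.Dict.get?_insert_of_ne d c ht,
          List.find?_cons_of_neg (by simp [beq_iff_eq]; exact fun h => ht h.symm)]

-- the two target loops agree once each target's scan agrees
theorem targets_agree (items : List (String × String)) (index : PySem.Dict String String)
    (ts : List String) (h : ∀ t ∈ ts, pickInnerA t items = index.get? t) :
    pickTargetsA items ts = pickTargetsB index ts := by
  induction ts with
  | nil => rfl
  | cons t ts ih =>
    have ht := h t (by simp)
    simp only [pickTargetsA, pickTargetsB, ht]
    cases index.get? t with
    | some o => rfl
    | none => exact ih (fun t' ht' => h t' (by simp [ht']))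

-- no priority target name is itself a bad column name
theorem order_not_bad : ∀ t ∈ incomeRevenueOrder, isBadCol t = false := by decide

theorem pick_eq (columns : List String) :
    pick_income_revenue_column_py columns = pick_income_revenue_column_py_alt columns := by
  unfold pick_income_revenue_column_py pick_income_revenue_column_py_alt
  simp only [List.map_id']
  have hitems :
      (columns.foldl (fun d c => d.insert c (normCol c)) PySem.Dict.empty).items
        = (PySem.Set.ofList columns).map (fun c => (c, normCol c)) := by
    rw [normsDict_items columns PySem.Dict.empty [] rfl rfl List.nodup_nil]
    rfl
  have hget : ∀ t,
      ((columns.foldl (fun d c => if d.contains (normCol c) then d else d.insert (normCol c) c)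
        PySem.Dict.empty).get? t) = columns.find? (fun c => normCol c == t) := by
    intro t; rw [indexB_get?]; simp
  have hinner : ∀ t ∈ incomeRevenueOrder,
      pickInnerA t (columns.foldl (fun d c => d.insert c (normCol c)) PySem.Dict.empty).items
        = ((columns.foldl (fun d c => if d.contains (normCol c) then d else d.insert (normCol c) c)
            PySem.Dict.empty).get? t) := by
    intro t htmem
    rw [hitems, pickInnerA_map, order_not_bad t htmem, if_neg (by simp), find?_ofList, hget]
  rw [targets_agree _ _ _ hinner]
  cases (pickTargetsB
      (columns.foldl (fun d c => if d.contains (normCol c) then d else d.insert (normCol c) c)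
        PySem.Dict.empty) incomeRevenueOrder) with
  | some o => rfl
  | none =>
    simp only []
    rw [hitems, pickFallbackA_map, find?_ofList]

-- ===== VERDICT (by name: the statement is the Claim_ definition above) =====
theorem pick_income_revenue_column_py_spec : Claim_equal_pick_income_revenue_column_py := by
  intro columns _
  unfold Spec_pick_income_revenue_column_py
  exact pick_eq columns
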